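-- pv_equiv track=rewrite | github.com/namerror/JobForge | scripts/eval_cases_generator.py | rank_expected
-- ===== SOURCE A (Python) =====
-- def rank_expected(
--     skills: list[str],
--     pool: dict,
--     category: str,
--     ranking: bool,
-- ) -> list[str]:
--     """Order expected skills: core first, then nice, alphabetical within tier.
--
--     If ranking is disabled, returns alphabetical order only.
--     """
--     if not ranking:
--         return sorted(skills)
--
--     buckets = pool.get(category, {})
--     core_set = set(buckets.get("core", []))
--
--     core_skills = sorted(s for s in skills if s in core_set)
--     nice_skills = sorted(s for s in skills if s not in core_set)
--
--     return core_skills + nice_skills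
-- ===== SOURCE B (Python) =====
-- def rank_expected(
--     skills: list[str],
--     pool: dict,
--     category: str,
--     ranking: bool,
-- ) -> list[str]:
--     """Order expected skills: core first, then nice, alphabetical within tier.
--
--     Sort the whole list ONCE, then make a single linear pass that deals the
--     already-sorted names into a core bucket and a nice bucket; concatenate.
--     """
--     if not ranking:
--         return sorted(skills)
--     core_set = set(pool.get(category, {}).get("core", []))
--     core, nice = [], []
--     for s in sorted(skills):
--         (core if s in core_set else nice).append(s)
--     return core + nice
-- ===== Notes on version B (the rewrite author's own statement) =====
-- stated objective: alternative
-- what changed: Instead of filtering the list twice and sorting each tier separately, B sorts the whole list once and then deals the sorted names into core/nice buckets in a single linear pass before concatenating.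
import Mathlib
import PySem

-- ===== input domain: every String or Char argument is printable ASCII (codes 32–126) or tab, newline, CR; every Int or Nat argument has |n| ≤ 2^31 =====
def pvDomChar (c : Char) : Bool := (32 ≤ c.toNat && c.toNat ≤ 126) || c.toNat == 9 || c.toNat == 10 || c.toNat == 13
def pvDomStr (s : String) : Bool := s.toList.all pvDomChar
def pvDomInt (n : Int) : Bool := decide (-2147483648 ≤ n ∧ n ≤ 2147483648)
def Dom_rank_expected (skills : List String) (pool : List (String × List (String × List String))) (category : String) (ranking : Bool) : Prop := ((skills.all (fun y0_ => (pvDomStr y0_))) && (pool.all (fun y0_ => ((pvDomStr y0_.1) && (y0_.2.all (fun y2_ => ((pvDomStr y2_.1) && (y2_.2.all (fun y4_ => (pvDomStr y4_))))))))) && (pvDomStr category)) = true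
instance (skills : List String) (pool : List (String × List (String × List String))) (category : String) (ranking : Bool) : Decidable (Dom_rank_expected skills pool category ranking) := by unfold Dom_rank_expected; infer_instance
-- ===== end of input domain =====

-- B sorts the whole list once and deals the sorted names into core/nice buckets in one linear pass (alternative decomposition; same cost).


-- ===== PORT A =====
def rank_expected (skills : List String) (pool : List (String × List (String × List String))) (category : String) (ranking : Bool) : List String :=
  if !ranking then
    PySem.List.sorted skills (fun s => s) false
  else
    let buckets : List (String × List String) := PySem.Dict.getD ⟨pool⟩ category []
    let core_set : PySem.Set String := PySem.Set.ofList (PySem.Dict.getD ⟨buckets⟩ "core" [])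
    let core_skills := PySem.List.sorted (skills.filter (fun s => core_set.contains s)) (fun s => s) false
    let nice_skills := PySem.List.sorted (skills.filter (fun s => !core_set.contains s)) (fun s => s) false
    core_skills ++ nice_skills

-- ===== PORT B =====
def rank_expected_alt (skills : List String) (pool : List (String × List (String × List String))) (category : String) (ranking : Bool) : List String :=
  if !ranking then
    PySem.List.sorted skills (fun s => s) false
  else
    let core_set : PySem.Set String := PySem.Set.ofList (PySem.Dict.getD ⟨PySem.Dict.getD ⟨pool⟩ category []⟩ "core" [])
    let dealt : List String × List String :=
      (PySem.List.sorted skills (fun s => s) false).foldl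
        (fun acc s => if core_set.contains s then (acc.1 ++ [s], acc.2) else (acc.1, acc.2 ++ [s]))
        ([], [])
    dealt.1 ++ dealt.2

-- ===== PRECONDITION & SPEC =====
def Spec_rank_expected (skills : List String) (pool : List (String × List (String × List String))) (category : String) (ranking : Bool) (out : List String) : Prop := out = rank_expected_alt skills pool category ranking
instance (skills : List String) (pool : List (String × List (String × List String))) (category : String) (ranking : Bool) (out : List String) : Decidable (Spec_rank_expected skills pool category ranking out) := by unfold Spec_rank_expected; infer_instance

-- ===== CLAIM (what is proved, stated in full; the proofs are below) =====
def Claim_equal_rank_expected : Prop := ∀ (skills : List String) (pool : List (String × List (String × List String))) (category : String) (ranking : Bool), Dom_rank_expected skills pool category ranking → Spec_rank_expected skills pool category ranking (rank_expected skills pool category ranking)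

-- ===== LEMMAS AND PROOFS =====

-- the dealing pass peels a list apart into (matching, non-matching) sublists, preserving order
theorem foldl_deal (p : String → Bool) (xs : List String) :
    ∀ (C N : List String),
    xs.foldl (fun (acc : List String × List String) s =>
        if p s then (acc.1 ++ [s], acc.2) else (acc.1, acc.2 ++ [s])) (C, N)
      = (C ++ xs.filter p, N ++ xs.filter (fun s => !p s)) := by
  induction xs with
  | nil => intro C N; simp
  | cons x xs ih =>
    intro C N
    by_cases hx : p x = true
    · simp [hx, ih]
    · have hx' : p x = false := by simpa using hx
      simp [hx', ih]

-- filtering commutes with the one big sort: filter of sorted = sorted of filter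
theorem filter_sorted (p : String → Bool) (xs : List String) :
    (PySem.List.sorted xs (fun s => s) false).filter p
      = PySem.List.sorted (xs.filter p) (fun s => s) false := by
  refine (PySem.List.sorted_id_eq_of_perm_of_pairwise _ _ ?_ ?_).symm
  · exact (PySem.List.sorted_perm xs (fun s => s) false).filter p
  · exact (PySem.List.sorted_pairwise xs (fun s => s)).sublist (List.filter_sublist)

-- ===== VERDICT (by name: the statement is the Claim_ definition above) =====
theorem rank_expected_spec : Claim_equal_rank_expected := by
  intro skills pool category ranking _
  unfold Spec_rank_expected rank_expected rank_expected_alt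
  cases ranking with
  | false => rfl
  | true =>
    simp only [Bool.not_true, Bool.false_eq_true, if_false]
    rw [foldl_deal, filter_sorted, filter_sorted]
    rfl
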